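-- pv_equiv track=rewrite | github.com/dvkpatel11/BodyVision | app/api/result_parser.py | _get_validation_recommendations
-- ===== SOURCE A (Python) =====
-- def _get_validation_recommendations(issues: list) -> list:
--     """Get recommendations based on validation issues."""
--     if not issues:
--         return ["All measurements appear within normal ranges"]
--
--     recommendations = []
--
--     for issue in issues:
--         if "body fat" in issue.lower():
--             recommendations.append(
--                 "Retake photos with better lighting and clearer pose"
--             )
--         elif "neck" in issue.lower():
--             recommendations.append(
--                 "Ensure neck is clearly visible in front view photo"
--             )
--         elif "waist" in issue.lower():
--             recommendations.append(
--                 "Check that waist area is clearly visible in all photos"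
--             )
--         elif "circumference" in issue.lower():
--             recommendations.append("Verify photos show clear body contours")
--
--     if not recommendations:
--         recommendations.append(
--             "Review photo quality and retake if measurements seem incorrect"
--         )
--
--     return recommendations
-- ===== SOURCE B (Python) =====
-- _RULES = [
--     ("body fat", "Retake photos with better lighting and clearer pose"),
--     ("neck", "Ensure neck is clearly visible in front view photo"),
--     ("waist", "Check that waist area is clearly visible in all photos"),
--     ("circumference", "Verify photos show clear body contours"),
-- ]
--
--
-- def _get_validation_recommendations(issues: list) -> list:
--     """Rule-major version: sweep the issue list once per rule, filling empty slots."""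
--     if not issues:
--         return ["All measurements appear within normal ranges"]
--     lows = [s.lower() for s in issues]
--     assigned = [None] * len(issues)
--     for key, rec in _RULES:
--         assigned = [rec if slot is None and key in low else slot
--                     for slot, low in zip(assigned, lows)]
--     recs = [r for r in assigned if r is not None]
--     return recs or ["Review photo quality and retake if measurements seem incorrect"]
-- ===== Notes on version B (the rewrite author's own statement) =====
-- stated objective: alternative
-- what changed: Transposes the traversal: instead of A's issue-major single pass with a four-branch if/elif cascade, B makes one pass over the issue list per rule (rule-major), filling a parallel slot array where a slot is still empty, then collects the filled slots; earlier rules fill first, so priority is preserved.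
import Mathlib
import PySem

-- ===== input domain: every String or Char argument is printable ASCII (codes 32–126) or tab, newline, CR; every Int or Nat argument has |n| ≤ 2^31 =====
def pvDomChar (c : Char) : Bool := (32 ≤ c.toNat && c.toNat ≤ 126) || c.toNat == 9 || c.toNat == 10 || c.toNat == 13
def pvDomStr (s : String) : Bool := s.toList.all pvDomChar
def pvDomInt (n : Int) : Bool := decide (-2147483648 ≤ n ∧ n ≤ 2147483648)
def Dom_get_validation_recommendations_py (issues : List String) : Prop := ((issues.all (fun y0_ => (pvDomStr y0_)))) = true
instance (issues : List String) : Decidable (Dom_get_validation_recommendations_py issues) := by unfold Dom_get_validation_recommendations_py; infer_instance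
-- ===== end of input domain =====

-- B transposes the traversal: one sweep over the issues per rule, filling empty slots of a parallel array, instead of A's per-issue if/elif cascade (alternative decomposition, same cost).


-- ===== PORT A =====
def get_validation_recommendations_py (issues : List String) : List String :=
  if issues = [] then ["All measurements appear within normal ranges"]
  else
    let recommendations := issues.foldl (fun recommendations issue =>
      if PySem.Str.isIn "body fat" (PySem.Str.lower issue) then
        recommendations ++ ["Retake photos with better lighting and clearer pose"]
      else if PySem.Str.isIn "neck" (PySem.Str.lower issue) then
        recommendations ++ ["Ensure neck is clearly visible in front view photo"]
      else if PySem.Str.isIn "waist" (PySem.Str.lower issue) then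
        recommendations ++ ["Check that waist area is clearly visible in all photos"]
      else if PySem.Str.isIn "circumference" (PySem.Str.lower issue) then
        recommendations ++ ["Verify photos show clear body contours"]
      else recommendations) []
    if recommendations = [] then
      ["Review photo quality and retake if measurements seem incorrect"]
    else recommendations

-- ===== PORT B =====
def pvRules : List (String × String) :=
  [("body fat", "Retake photos with better lighting and clearer pose"),
   ("neck", "Ensure neck is clearly visible in front view photo"),
   ("waist", "Check that waist area is clearly visible in all photos"),
   ("circumference", "Verify photos show clear body contours")]

def get_validation_recommendations_py_alt (issues : List String) : List String :=
  if issues = [] then ["All measurements appear within normal ranges"]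
  else
    let lows := issues.map PySem.Str.lower
    let assigned := pvRules.foldl (fun assigned kr =>
        (assigned.zip lows).map (fun p =>
          if p.1 = none ∧ PySem.Str.isIn kr.1 p.2 then some kr.2 else p.1))
      (List.replicate issues.length (none : Option String))
    let recs := assigned.filterMap id
    if recs = [] then ["Review photo quality and retake if measurements seem incorrect"]
    else recs

-- ===== PRECONDITION & SPEC =====
def Spec_get_validation_recommendations_py (issues : List String) (out : List String) : Prop := out = get_validation_recommendations_py_alt issues
instance (issues : List String) (out : List String) : Decidable (Spec_get_validation_recommendations_py issues out) := by unfold Spec_get_validation_recommendations_py; infer_instance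

-- ===== CLAIM (what is proved, stated in full; the proofs are below) =====
def Claim_equal_get_validation_recommendations_py : Prop := ∀ (issues : List String), Dom_get_validation_recommendations_py issues → Spec_get_validation_recommendations_py issues (get_validation_recommendations_py issues)

-- ===== LEMMAS AND PROOFS =====

-- first rule whose keyword occurs in the (already lowered) string
def pvFirst (low : String) : Option String :=
  (pvRules.find? (fun kr => PySem.Str.isIn kr.1 low)).map Prod.snd

-- elementwise recurrence of B's rule fold
def pvElemFold (rules : List (String × String)) (low : String) (a : Option String) : Option String :=
  rules.foldl (fun a kr => if a = none ∧ PySem.Str.isIn kr.1 low then some kr.2 else a) a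

theorem pvElemFold_some (rules : List (String × String)) (low : String) (v : String) :
    pvElemFold rules low (some v) = some v := by
  induction rules with
  | nil => rfl
  | cons kr rs ih => simp [pvElemFold, List.foldl_cons] at ih ⊢; exact ih

theorem pvElemFold_none (rules : List (String × String)) (low : String) :
    pvElemFold rules low none = (rules.find? (fun kr => PySem.Str.isIn kr.1 low)).map Prod.snd := by
  induction rules with
  | nil => rfl
  | cons kr rs ih =>
    simp only [pvElemFold, List.foldl_cons, List.find?]
    by_cases h : PySem.Str.isIn kr.1 low
    · simp only [h, and_true, if_pos]
      simpa [pvElemFold] using pvElemFold_some rs low kr.2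
    · have h' : PySem.Str.isIn kr.1 low = false := by simpa using h
      simp only [h', and_false, if_neg, Bool.false_eq_true, not_false_eq_true]
      exact ih

theorem pv_zip_map_self {α β : Type} (g : α → β) (l : List α) :
    (l.map g).zip l = l.map (fun x => (g x, x)) := by
  induction l with
  | nil => rfl
  | cons a t ih => simp [ih]

-- B's rule-major fold acts elementwise on a state that is a map over lows
theorem pv_rule_fold (rules : List (String × String)) (lows : List String)
    (g : String → Option String) :
    rules.foldl (fun assigned kr =>
        (assigned.zip lows).map (fun p =>
          if p.1 = none ∧ PySem.Str.isIn kr.1 p.2 then some kr.2 else p.1))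
      (lows.map g)
    = lows.map (fun low => pvElemFold rules low (g low)) := by
  induction rules generalizing g with
  | nil => simp [pvElemFold]
  | cons kr rs ih =>
    rw [List.foldl_cons, pv_zip_map_self, List.map_map]
    have hmap : ((fun p : Option String × String =>
          if p.1 = none ∧ PySem.Str.isIn kr.1 p.2 then some kr.2 else p.1) ∘ fun x => (g x, x))
        = fun low => if g low = none ∧ PySem.Str.isIn kr.1 low then some kr.2 else g low := rfl
    rw [hmap, ih]
    apply List.map_congr_left
    intro low _
    simp [pvElemFold, List.foldl_cons]

-- A's per-issue if/elif chain appends exactly (pvFirst (lower issue)).toList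
theorem pv_step_eq (recommendations : List String) (issue : String) :
    (if PySem.Str.isIn "body fat" (PySem.Str.lower issue) then
        recommendations ++ ["Retake photos with better lighting and clearer pose"]
      else if PySem.Str.isIn "neck" (PySem.Str.lower issue) then
        recommendations ++ ["Ensure neck is clearly visible in front view photo"]
      else if PySem.Str.isIn "waist" (PySem.Str.lower issue) then
        recommendations ++ ["Check that waist area is clearly visible in all photos"]
      else if PySem.Str.isIn "circumference" (PySem.Str.lower issue) then
        recommendations ++ ["Verify photos show clear body contours"]
      else recommendations)
    = recommendations ++ (pvFirst (PySem.Str.lower issue)).toList := by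
  simp only [pvFirst, pvRules, List.find?]
  split_ifs <;> simp_all

theorem pv_foldl_eq (issues : List String) (acc : List String) :
    issues.foldl (fun recommendations issue =>
      if PySem.Str.isIn "body fat" (PySem.Str.lower issue) then
        recommendations ++ ["Retake photos with better lighting and clearer pose"]
      else if PySem.Str.isIn "neck" (PySem.Str.lower issue) then
        recommendations ++ ["Ensure neck is clearly visible in front view photo"]
      else if PySem.Str.isIn "waist" (PySem.Str.lower issue) then
        recommendations ++ ["Check that waist area is clearly visible in all photos"]
      else if PySem.Str.isIn "circumference" (PySem.Str.lower issue) then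
        recommendations ++ ["Verify photos show clear body contours"]
      else recommendations) acc
    = acc ++ issues.filterMap (fun issue => pvFirst (PySem.Str.lower issue)) := by
  induction issues generalizing acc with
  | nil => simp
  | cons x xs ih =>
    rw [List.foldl_cons, pv_step_eq, ih, List.filterMap_cons, List.append_assoc]
    cases pvFirst (PySem.Str.lower x) <;> simp

-- ===== VERDICT (by name: the statement is the Claim_ definition above) =====
theorem get_validation_recommendations_py_spec : Claim_equal_get_validation_recommendations_py := by
  intro issues _
  unfold Spec_get_validation_recommendations_py get_validation_recommendations_py get_validation_recommendations_py_alt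
  by_cases h : issues = []
  · simp [h]
  · simp only [if_neg h]
    rw [pv_foldl_eq, List.nil_append]
    have hrep : ∀ (l : List String), List.replicate l.length (none : Option String)
        = (l.map PySem.Str.lower).map (fun _ => (none : Option String)) := by
      intro l
      induction l with
      | nil => rfl
      | cons a t ih => simp [ih, List.replicate_succ]
    have hfun : ((id : Option String → Option String) ∘
          ((fun low => pvElemFold pvRules low none) ∘ PySem.Str.lower))
        = fun issue => pvFirst (PySem.Str.lower issue) := by
      funext issue
      simp [Function.comp, pvElemFold_none, pvFirst]
    rw [hrep issues, pv_rule_fold, List.map_map, List.filterMap_map, hfun]
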